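-- pv_equiv track=rewrite | github.com/EdwaRen/Competitve-Programming | LC/96.unique-binary-search-trees.py | numTreesProper
-- ===== SOURCE A (Python) =====
-- def numTreesProper(n):
--     """
--     Uses the property that the number of possible subtrees at root i is left tree * right tree
--     This is for all i in n, thus O(n^2)
--     """
--     # Handle edge case
--     if n < 2:
--         return n
--
--     # Init
--     dp = [0] * (n+1)
--     dp[0] = 1
--     dp[1] = 1
--
--     # Loop through all n
--     for i in range(2, n+1):
--         for j in range(1, i+1):
--             # Inner loop finds number of BSTs possible with i possible nodes
--             dp[i] += dp[j-1]*dp[i-j]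
--
--     # Possibilties at n is just last element of dp
--     return dp[-1]
-- ===== SOURCE B (Python) =====
-- def numTreesProper(n):
--     # Closed-form Catalan number: C(n) = binom(2n, n) // (n+1), computed by an
--     # O(n) exact integer product (each partial quotient is a binomial, so // is exact).
--     if n < 2:
--         return n
--     c = 1
--     for i in range(1, n + 1):
--         c = c * (n + i) // i
--     return c // (n + 1)
-- ===== Notes on version B (the rewrite author's own statement) =====
-- stated objective: faster
-- what changed: Replaces the O(n^2) Catalan DP table with the closed-form binomial product C(n)=binom(2n,n)//(n+1) computed by a single O(n) exact integer product.
import Mathlib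
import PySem

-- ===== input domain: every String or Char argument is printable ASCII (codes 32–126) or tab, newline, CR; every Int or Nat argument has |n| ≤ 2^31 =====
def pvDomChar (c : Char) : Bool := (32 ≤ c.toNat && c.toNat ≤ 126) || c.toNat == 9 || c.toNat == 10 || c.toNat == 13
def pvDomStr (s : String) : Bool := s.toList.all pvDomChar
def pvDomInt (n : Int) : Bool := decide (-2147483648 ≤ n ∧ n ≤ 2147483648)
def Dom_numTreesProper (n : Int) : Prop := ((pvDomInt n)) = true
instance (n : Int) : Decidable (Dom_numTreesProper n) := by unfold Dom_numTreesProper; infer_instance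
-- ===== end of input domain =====

-- B computes the nth Catalan number by the closed-form O(n) binomial product instead of A's O(n^2) DP table; equal on all inputs.

-- ===== PORT A =====
def numTreesProper (n : Int) : Int :=
  if n < 2 then n
  else
    let dp : List Int := List.replicate (n + 1).toNat 0
    let dp := PySem.List.pySetD dp 0 1
    let dp := PySem.List.pySetD dp 1 1
    let dp := (PySem.List.pyRange 2 (n + 1) 1).foldl (fun dp i =>
      (PySem.List.pyRange 1 (i + 1) 1).foldl (fun dp j =>
        PySem.List.pySetD dp i
          (PySem.List.pyGetD dp i 0 +
            PySem.List.pyGetD dp (j - 1) 0 * PySem.List.pyGetD dp (i - j) 0)) dp) dp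
    PySem.List.pyGetD dp (-1) 0

-- ===== PORT B =====
def numTreesProper_alt (n : Int) : Int :=
  if n < 2 then n
  else
    let c := (PySem.List.pyRange 1 (n + 1) 1).foldl
      (fun c i => PySem.Int.floordiv (c * (n + i)) i) 1
    PySem.Int.floordiv c (n + 1)

-- ===== PRECONDITION & SPEC =====
def Spec_numTreesProper (n : Int) (out : Int) : Prop := out = numTreesProper_alt n
instance (n : Int) (out : Int) : Decidable (Spec_numTreesProper n out) := by unfold Spec_numTreesProper; infer_instance

-- ===== CLAIM (what is proved, stated in full; the proofs are below) =====
def Claim_equal_numTreesProper : Prop := ∀ (n : Int), Dom_numTreesProper n → Spec_numTreesProper n (numTreesProper n)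

-- ===== LEMMAS AND PROOFS =====

theorem bLoop (m : ℕ) (k : ℕ) :
    (PySem.List.pyRange 1 ((k : Int) + 1) 1).foldl
      (fun c i => PySem.Int.floordiv (c * ((m : Int) + i)) i) 1
    = (Nat.choose (m + k) k : Int) := by
  induction k with
  | zero =>
    rw [PySem.List.pyRange_one_eq_nil (by norm_num)]
    simp
  | succ k ih =>
    have hc : ((k + 1 : ℕ) : Int) = (k : Int) + 1 := by push_cast; ring
    rw [hc]
    have h1 : ((k : Int) + 1 + 1) = ((k : Int) + 1) + 1 := by ring
    rw [h1, PySem.List.pyRange_one_succ_right (by omega), List.foldl_append, ih]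
    simp only [List.foldl_cons, List.foldl_nil]
    have h2 : (Nat.choose (m + k) k : Int) * ((m : Int) + ((k : Int) + 1))
        = ((Nat.choose (m + k) k * (m + k + 1) : ℕ) : Int) := by push_cast; ring
    rw [h2]
    have h3 : ((k : Int) + 1) = ((k + 1 : ℕ) : Int) := by push_cast; ring
    rw [h3, PySem.Int.floordiv_natCast]
    congr 1
    have h4 : Nat.choose (m + k) k * (m + k + 1) = Nat.choose (m + k + 1) (k + 1) * (k + 1) := by
      rw [← Nat.add_one_mul_choose_eq, Nat.mul_comm]
    rw [h4, Nat.mul_div_cancel _ (Nat.succ_pos k), Nat.add_assoc]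
theorem bVal (m : ℕ) (h : 2 ≤ m) : numTreesProper_alt (m : Int) = (catalan m : Int) := by
  unfold numTreesProper_alt
  rw [if_neg (by exact_mod_cast (by omega : ¬ (m : Int) < 2))]
  rw [bLoop m m]
  have h1 : m + m = 2 * m := by ring
  have h2 : ((m : Int) + 1) = ((m + 1 : ℕ) : Int) := by push_cast; ring
  rw [h1, h2, PySem.Int.floordiv_natCast]
  rw [← Nat.centralBinom, ← catalan_eq_centralBinom_div]
theorem sum_map_range_eq (f : ℕ → Int) (n : ℕ) :
    ((List.range n).map f).sum = ∑ i ∈ Finset.range n, f i := by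
  induction n with
  | zero => simp
  | succ n ih => rw [List.range_succ, Finset.sum_range_succ, List.map_append, List.sum_append, ih]; simp
theorem sumCat (k : ℕ) :
    ((List.range (k + 1)).map (fun t => (catalan t : Int) * (catalan (k - t) : Int))).sum
      = (catalan (k + 1) : Int) := by
  rw [sum_map_range_eq, catalan_succ k]
  push_cast
  rw [Fin.sum_univ_eq_sum_range (fun i => (catalan i : Int) * (catalan (k - i) : Int)) (k+1)]
-- A-side helpers
def L (m k : ℕ) : List Int := (List.range (m + 1)).map (fun t => if t ≤ k then (catalan t : Int) else 0)

theorem L_length (m k : ℕ) : (L m k).length = m + 1 := by simp [L]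

theorem L_get (m k t : ℕ) (ht : t < m + 1) :
    (L m k)[t]'(by simp [L_length, ht]) = if t ≤ k then (catalan t : Int) else 0 := by
  simp [L]

theorem Lset_get (m k : ℕ) (s : Int) (t : ℕ) (ht : t < m + 1) :
    ((L m k).set (k + 1) s)[t]'(by simp [List.length_set, L_length]; omega) =
      if t = k + 1 then s else if t ≤ k then (catalan t : Int) else 0 := by
  rw [List.getElem_set]
  rcases eq_or_ne t (k + 1) with h | h
  · simp [h]
  · rw [if_neg (by omega), if_neg h, L_get m k t ht]

theorem pyGetD_Lset (m k : ℕ) (s : Int) (i : Int) (h0 : 0 ≤ i) (h1 : i < (m : Int) + 1) :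
    PySem.List.pyGetD ((L m k).set (k + 1) s) i 0 =
      if i.toNat = k + 1 then s else if i.toNat ≤ k then (catalan i.toNat : Int) else 0 := by
  rw [PySem.List.pyGetD_eq_getElem _ _ h0 (by rw [List.length_set, L_length]; omega)]
  exact Lset_get m k s i.toNat (by omega)

theorem innerLoop (m k : ℕ) (hk : k + 1 ≤ m) :
    ∀ (js : List Int), (∀ j ∈ js, 1 ≤ j ∧ j ≤ (k : Int) + 1) → ∀ (s : Int),
    js.foldl (fun dp j =>
        PySem.List.pySetD dp ((k : Int) + 1)
          (PySem.List.pyGetD dp ((k : Int) + 1) 0 +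
            PySem.List.pyGetD dp (j - 1) 0 * PySem.List.pyGetD dp ((k : Int) + 1 - j) 0))
      ((L m k).set (k + 1) s)
    = (L m k).set (k + 1)
        (s + (js.map (fun j => (catalan (j - 1).toNat : Int) * (catalan ((k : Int) + 1 - j).toNat : Int))).sum) := by
  intro js
  induction js with
  | nil => intro _ s; simp
  | cons j js ih =>
    intro hjs s
    obtain ⟨hj1, hj2⟩ := hjs j (List.mem_cons_self)
    rw [List.foldl_cons]
    rw [pyGetD_Lset m k s ((k : Int) + 1) (by omega) (by omega)]
    rw [if_pos (by omega)]
    rw [pyGetD_Lset m k s (j - 1) (by omega) (by omega)]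
    rw [if_neg (by omega), if_pos (by omega)]
    rw [pyGetD_Lset m k s ((k : Int) + 1 - j) (by omega) (by omega)]
    rw [if_neg (by omega), if_pos (by omega)]
    rw [PySem.List.pySetD_of_nonneg _ _ (by omega)]
    have hT : ((k : Int) + 1).toNat = k + 1 := by omega
    rw [hT, List.set_set]
    rw [ih (fun j' hj' => hjs j' (List.mem_cons_of_mem _ hj'))]
    rw [List.map_cons, List.sum_cons, ← add_assoc]

theorem L_set_zero (m k : ℕ) : (L m k).set (k + 1) (0 : Int) = L m k := by
  apply List.ext_getElem (by simp [List.length_set])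
  intro t h1 h2
  rw [Lset_get m k 0 t (by rw [L_length] at h2; omega), L_get m k t (by rw [L_length] at h2; omega)]
  rcases eq_or_ne t (k + 1) with h | h
  · rw [if_pos h, if_neg (by omega)]
  · rw [if_neg h]

theorem L_set_succ (m k : ℕ) :
    (L m k).set (k + 1) ((catalan (k + 1) : Int)) = L m (k + 1) := by
  apply List.ext_getElem (by simp [List.length_set, L_length])
  intro t h1 h2
  rw [Lset_get m k _ t (by rw [L_length] at h2; omega), L_get m (k + 1) t (by rw [L_length] at h2; omega)]
  rcases eq_or_ne t (k + 1) with h | h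
  · rw [if_pos h, if_pos (by omega), h]
  · rw [if_neg h]
    by_cases h2' : t ≤ k
    · rw [if_pos h2', if_pos (by omega)]
    · rw [if_neg h2', if_neg (by omega)]

theorem innerSum (k : ℕ) :
    ((PySem.List.pyRange 1 ((k : Int) + 1 + 1) 1).map
      (fun j => (catalan (j - 1).toNat : Int) * (catalan ((k : Int) + 1 - j).toNat : Int))).sum
    = (catalan (k + 1) : Int) := by
  rw [PySem.List.pyRange_one]
  have hlen : ((k : Int) + 1 + 1 - 1).toNat = k + 1 := by omega
  rw [hlen, List.map_map]
  rw [List.map_congr_left (l := List.range (k + 1))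
    (g := fun t => (catalan t : Int) * (catalan (k - t) : Int)) ?_]
  · exact sumCat k
  · intro t ht
    rw [List.mem_range] at ht
    simp only [Function.comp]
    rw [show ((1 : Int) + (t : Int) - 1).toNat = t by omega,
        show ((k : Int) + 1 - (1 + (t : Int))).toNat = k - t by omega]

theorem outerStep (m k : ℕ) (hk : k + 1 ≤ m) :
    (PySem.List.pyRange 1 ((k : Int) + 1 + 1) 1).foldl (fun dp j =>
        PySem.List.pySetD dp ((k : Int) + 1)
          (PySem.List.pyGetD dp ((k : Int) + 1) 0 +
            PySem.List.pyGetD dp (j - 1) 0 * PySem.List.pyGetD dp ((k : Int) + 1 - j) 0))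
      (L m k)
    = L m (k + 1) := by
  conv_lhs => rw [← L_set_zero m k]
  rw [innerLoop m k hk _ (fun j hj => by rw [PySem.List.mem_pyRange_one] at hj; omega) 0]
  rw [innerSum k, zero_add, L_set_succ m k]
theorem outerLoop (m : ℕ) :
    ∀ (d : ℕ), 1 + d ≤ m →
    (PySem.List.pyRange 2 (2 + (d : Int)) 1).foldl (fun dp i =>
      (PySem.List.pyRange 1 (i + 1) 1).foldl (fun dp j =>
        PySem.List.pySetD dp i
          (PySem.List.pyGetD dp i 0 +
            PySem.List.pyGetD dp (j - 1) 0 * PySem.List.pyGetD dp (i - j) 0)) dp)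
      (L m 1)
    = L m (1 + d) := by
  intro d
  induction d with
  | zero => intro _; rw [PySem.List.pyRange_one_eq_nil (by omega)]; rfl
  | succ d ih =>
    intro hd
    rw [show (2 + ((d + 1 : ℕ) : Int)) = (2 + (d : Int)) + 1 by push_cast; ring]
    rw [PySem.List.pyRange_one_succ_right (by omega), List.foldl_append, ih (by omega)]
    simp only [List.foldl_cons, List.foldl_nil]
    rw [show (2 + (d : Int)) = ((1 + d : ℕ) : Int) + 1 by push_cast; ring]
    rw [outerStep m (1 + d) (by omega)]
    rfl

theorem initDP (m : ℕ) (hm : 2 ≤ m) :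
    PySem.List.pySetD (PySem.List.pySetD (List.replicate (((m : Int) + 1).toNat) (0 : Int)) 0 1) 1 1 = L m 1 := by
  rw [show ((m : Int) + 1).toNat = m + 1 by omega]
  rw [PySem.List.pySetD_of_nonneg _ _ (by norm_num), PySem.List.pySetD_of_nonneg _ _ (by norm_num)]
  apply List.ext_getElem (by simp [L_length])
  intro t h1 h2
  rw [L_get m 1 t (by rw [L_length] at h2; omega)]
  simp only [Int.toNat_one, Int.toNat_zero, List.getElem_set, List.getElem_replicate]
  by_cases h0 : t = 0
  · subst h0; norm_num
  · by_cases h1' : t = 1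
    · subst h1'; norm_num [catalan_one]
    · rw [if_neg (by omega), if_neg (by omega), if_neg (by omega)]

theorem aVal (m : ℕ) (h : 2 ≤ m) : numTreesProper (m : Int) = (catalan m : Int) := by
  have hn : ¬ (m : Int) < 2 := by omega
  simp only [numTreesProper, if_neg hn]
  rw [initDP m h]
  rw [show ((m : Int) + 1) = 2 + ((m - 1 : ℕ) : Int) by omega]
  rw [outerLoop m (m - 1) (by omega)]
  rw [show 1 + (m - 1) = m by omega]
  have hne : L m m ≠ [] := List.ne_nil_of_length_pos (by rw [L_length]; omega)
  rw [PySem.List.pyGetD_neg_one _ _ hne, List.getLast_eq_getElem]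
  simp only [L_length, Nat.add_sub_cancel]
  rw [L_get m m m (by omega), if_pos (le_refl m)]

-- ===== VERDICT (by name: the statement is the Claim_ definition above) =====
theorem numTreesProper_spec : Claim_equal_numTreesProper := by
  intro n _
  unfold Spec_numTreesProper
  by_cases h : n < 2
  · simp [numTreesProper, numTreesProper_alt, h]
  · have h2 : 2 ≤ n := by omega
    obtain ⟨m, rfl⟩ : ∃ m : ℕ, n = (m : Int) := ⟨n.toNat, by omega⟩
    have hm : 2 ≤ m := by exact_mod_cast h2
    rw [aVal m hm, bVal m hm]
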